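-- pv_equiv track=rewrite | github.com/sreejamuvva2002/Ev_Crawler_Automation | Tavily_ev-automation-main/evAutomationUpdated/src/ev_llm_compare/chunking.py | _ordered_columns
-- ===== SOURCE A (Python) =====
-- def _ordered_columns(values: dict[str, str]) -> list[str]:
--     preferred = [
--         "Company",
--         "Category",
--         "Industry Group",
--         "Location",
--         "Primary Facility Type",
--         "EV Supply Chain Role",
--         "Primary OEMs",
--         "Supplier or Affiliation Type",
--         "Employment",
--         "Product / Service",
--         "EV / Battery Relevant",
--         "Classification Method",
--     ]
--     ordered = [column for column in preferred if column in values]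
--     ordered.extend(column for column in values if column not in ordered)
--     return ordered
-- ===== SOURCE B (Python) =====
-- _PREFERRED = [
--     "Company",
--     "Category",
--     "Industry Group",
--     "Location",
--     "Primary Facility Type",
--     "EV Supply Chain Role",
--     "Primary OEMs",
--     "Supplier or Affiliation Type",
--     "Employment",
--     "Product / Service",
--     "EV / Battery Relevant",
--     "Classification Method",
-- ]
--
-- _RANK = {col: i for i, col in enumerate(_PREFERRED)}
--
--
-- def _ordered_columns(values: dict[str, str]) -> list[str]:
--     prefix = sorted((k for k in values if k in _RANK), key=_RANK.__getitem__)
--     suffix = [k for k in values if k not in _RANK]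
--     return prefix + suffix
-- ===== Notes on version B (the rewrite author's own statement) =====
-- stated objective: faster
-- what changed: Instead of scanning the preferred list and testing membership against the growing result, B builds a rank table once, takes the preferred keys directly from the dict and sorts them by rank, then appends the non-preferred keys in insertion order.
import Mathlib
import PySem

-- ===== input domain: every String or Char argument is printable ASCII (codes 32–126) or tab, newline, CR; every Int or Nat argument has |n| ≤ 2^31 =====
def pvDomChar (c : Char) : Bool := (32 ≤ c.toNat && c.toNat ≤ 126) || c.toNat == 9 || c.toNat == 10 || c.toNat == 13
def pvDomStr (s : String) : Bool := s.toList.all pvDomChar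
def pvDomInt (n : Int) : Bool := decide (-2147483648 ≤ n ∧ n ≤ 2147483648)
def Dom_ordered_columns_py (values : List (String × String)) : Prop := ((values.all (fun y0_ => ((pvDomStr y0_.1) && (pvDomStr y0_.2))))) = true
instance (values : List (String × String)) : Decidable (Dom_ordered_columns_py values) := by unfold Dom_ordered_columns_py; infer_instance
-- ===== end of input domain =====

-- B replaces A's preferred-list scan plus growing-result membership test by a rank
-- table: preferred keys taken from the dict and sorted by rank, then the rest in order.


-- ===== PORT A =====
def pvPreferred : List String :=
  ["Company", "Category", "Industry Group", "Location", "Primary Facility Type",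
   "EV Supply Chain Role", "Primary OEMs", "Supplier or Affiliation Type",
   "Employment", "Product / Service", "EV / Battery Relevant", "Classification Method"]

def ordered_columns_py (values : List (String × String)) : List String :=
  let keys := values.map Prod.fst
  let ordered := pvPreferred.filter (fun column => keys.contains column)
  -- ordered.extend(generator): the membership test sees the list as it grows
  keys.foldl (fun acc column => if acc.contains column then acc else acc ++ [column]) ordered

-- ===== PORT B =====
def pvRank : PySem.Dict String Int :=
  PySem.Dict.ofList ((List.zip pvPreferred (List.range pvPreferred.length)).map
    (fun p => (p.1, (p.2 : Int))))

def ordered_columns_py_alt (values : List (String × String)) : List String :=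
  let keys := values.map Prod.fst
  let pre := PySem.List.sorted (keys.filter (fun k => pvRank.contains k))
    (fun k => pvRank.getD k 0) false
  let suffix := keys.filter (fun k => !pvRank.contains k)
  pre ++ suffix

-- ===== PRECONDITION & SPEC =====
-- Pre_ excludes association lists with duplicate keys: a Python dict cannot hold
-- them, so such lists do not represent any input of the Python programs.
def Pre_ordered_columns_py (values : List (String × String)) : Prop :=
  (values.map Prod.fst).Nodup
instance (values : List (String × String)) : Decidable (Pre_ordered_columns_py values) := by
  unfold Pre_ordered_columns_py; infer_instance

def pvWitness_ordered_columns_py : (List (String × String)) :=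
  [("Company", "Acme"), ("foo", "bar"), ("Location", "NL")]

def Spec_ordered_columns_py (values : List (String × String)) (out : List String) : Prop := out = ordered_columns_py_alt values
instance (values : List (String × String)) (out : List String) : Decidable (Spec_ordered_columns_py values out) := by unfold Spec_ordered_columns_py; infer_instance

-- ===== CLAIM (what is proved, stated in full; the proofs are below) =====
def Claim_equal_ordered_columns_py : Prop := ∀ (values : List (String × String)), Dom_ordered_columns_py values → Pre_ordered_columns_py values → Spec_ordered_columns_py values (ordered_columns_py values)

-- ===== LEMMAS AND PROOFS =====

-- A's extend loop over distinct keys appends exactly the keys not already present.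
theorem foldl_extend_nodup (keys acc : List String) (h : keys.Nodup) :
    keys.foldl (fun a c => if a.contains c then a else a ++ [c]) acc
      = acc ++ keys.filter (fun c => !acc.contains c) := by
  induction keys generalizing acc with
  | nil => simp
  | cons c ks ih =>
    simp only [List.nodup_cons] at h
    by_cases hc : acc.contains c
    · rw [List.foldl_cons, if_pos hc, ih _ h.2, List.filter_cons]
      simp [List.contains_iff_mem.mp hc]
    · rw [List.foldl_cons, if_neg hc, ih _ h.2, List.filter_cons, List.append_assoc]
      have hfc : (ks.filter (fun x => !(acc ++ [c]).contains x))
               = ks.filter (fun x => !acc.contains x) := by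
        apply List.filter_congr; intro x hx
        have hxc : x ≠ c := fun e => h.1 (e ▸ hx)
        simp [hxc]
      rw [hfc]
      have hm : c ∉ acc := fun hm => hc (List.contains_iff_mem.mpr hm)
      simp [hm]

theorem keys_rank : pvRank.keys = pvPreferred := by decide

theorem rank_contains (k : String) : pvRank.contains k = pvPreferred.contains k := by
  rw [PySem.Dict.contains_eq_decide_mem_keys, keys_rank]; simp

-- the preferred columns are listed in strictly increasing rank
theorem rank_pairwise : pvPreferred.Pairwise (fun a b => pvRank.getD a 0 < pvRank.getD b 0) := by
  decide

theorem nodup_preferred : pvPreferred.Nodup := by decide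

-- ===== VERDICT (by name: the statement is the Claim_ definition above) =====
theorem ordered_columns_py_spec : Claim_equal_ordered_columns_py := by
  intro values _ hpre
  unfold Spec_ordered_columns_py ordered_columns_py ordered_columns_py_alt
  simp only []
  set keys := values.map Prod.fst with hkeys
  have hn : keys.Nodup := hpre
  set ordered := pvPreferred.filter (fun column => keys.contains column) with hord
  rw [foldl_extend_nodup keys ordered hn]
  have hmem : ∀ x, x ∈ ordered ↔ x ∈ keys.filter (fun k => pvRank.contains k) := by
    intro x
    simp [hord, rank_contains, and_comm]
  -- prefix: the rank-sorted preferred keys are exactly A's preferred scan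
  have hpre_eq : PySem.List.sorted (keys.filter (fun k => pvRank.contains k))
      (fun k => pvRank.getD k 0) false = ordered := by
    apply PySem.List.sorted_eq_of_perm_of_pairwise_lt
    · exact (List.perm_ext_iff_of_nodup (hord ▸ nodup_preferred.filter _)
        (hn.filter _)).mpr hmem
    · exact rank_pairwise.filter _
  -- suffix: keys already placed are exactly the preferred ones present
  have hsuf_eq : keys.filter (fun c => !ordered.contains c)
      = keys.filter (fun k => !pvRank.contains k) := by
    apply List.filter_congr
    intro x hx
    have : ordered.contains x = pvRank.contains x := by
      rw [rank_contains]
      by_cases hp : x ∈ pvPreferred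
      · simp [hord, hp, hx]
      · simp [hord, hp]
    rw [this]
  rw [hpre_eq, hsuf_eq]
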